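-- pv_equiv track=rewrite | github.com/yanisaspic/GORi | gori/utils.py | _prune_hierarchy
-- ===== SOURCE A (Python) =====
-- from typing import Any, Optional
--
-- def _get_generic_ancestors(
--     terms: set[str], hierarchy: dict[str, set[str]], ancestors: set[str] = set()
-- ) -> set[str]:
--     """Get the ancestors of multiple terms.
--     An ancestor is defined as an element ascending any of the input terms.
--
--     ``terms`` is a set of annotation terms.
--     ``hierarchy`` is a dict associating terms (keys) to their parents (values).
--     ``ancestors`` is a set of terms extended recursively.
--
--     Returns
--         A set of ancestor terms.
--     """
--     tmp = [hierarchy.get(e, set()) for e in terms]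
--     parents = {parent for subset in tmp for parent in subset}
--     terms = parents.difference(ancestors)
--     ancestors = ancestors.union(parents)
--     if len(terms) > 0:
--         ancestors = _get_generic_ancestors(terms, hierarchy, ancestors)
--     return ancestors
--
-- def _get_generic_descendants(
--     terms: set[str], hierarchy: dict[str, set[str]]
-- ) -> set[str]:
--     """Get the descendants of multiple terms.
--     A descendant is defined as an element descending any of the input terms.
--
--     ``terms`` is a set of annotation terms.
--     ``hierarchy`` is a dict associating terms (keys) to their parents (values).
--     ``ancestors`` is a set of terms extended recursively.
--
--     Returns
--         A set of descendant terms.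
--     """
--     ancestry = {e: _get_generic_ancestors({e}, hierarchy) for e in hierarchy.keys()}
--     is_descendant = lambda e: len(ancestry.get(e, set()).intersection(terms)) > 0
--     descendants = {d for d, ancestors in ancestry.items() if is_descendant(d)}
--     return descendants
--
-- def _prune_hierarchy(
--     hierarchy: dict[str, set[str]],
--     roots: Optional[set[str]] = None,
--     leaves: Optional[set[str]] = None,
-- ) -> dict[str, set[str]]:
--     """Prune a hierarchy, i.e. get a sub-hierarchy with specific roots and leaves.
--     If both roots and leaves are indicated, terms associated to both of them are returned.
--
--     ``hierarchy`` is a dict associating terms (keys) to their parents (values).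
--     ``roots`` is an optional set of terms to use as roots for the new hierarchy.
--     ``leaves`` is an optional set of terms to use as leaves for the new hierarchy.
--
--     Returns
--         A dict associating terms (keys) to their parents (values).
--     """
--     ancestors = (
--         set(hierarchy.keys())
--         if leaves is None
--         else _get_generic_ancestors(leaves, hierarchy) | leaves
--     )
--     descendants = (
--         set(hierarchy.keys())
--         if roots is None
--         else _get_generic_descendants(roots, hierarchy) | roots
--     )
--     terms = ancestors.intersection(descendants)
--     pruned_hierarchy = {e: hierarchy.get(e, set()) for e in terms}
--     return pruned_hierarchy
-- ===== SOURCE B (Python) =====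
-- from typing import Optional
--
-- def _reachable(adjacency: dict, starts) -> set:
--     """All elements reachable from ``starts`` through one or more adjacency edges,
--     found with a single worklist sweep (each element is expanded at most once)."""
--     seen: set = set()
--     queue = list(starts)
--     i = 0
--     while i < len(queue):
--         for nxt in adjacency.get(queue[i], ()):
--             if nxt not in seen:
--                 seen.add(nxt)
--                 queue.append(nxt)
--         i += 1
--     return seen
--
-- def _prune_hierarchy(
--     hierarchy: dict[str, set[str]],
--     roots: Optional[set[str]] = None,
--     leaves: Optional[set[str]] = None,
-- ) -> dict[str, set[str]]:
--     """Prune a hierarchy to the sub-hierarchy between ``roots`` and ``leaves``.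
--
--     One worklist sweep up the parent edges collects the ancestors of the leaves;
--     a parent-to-children map is built once and one worklist sweep down it collects
--     the descendants of the roots (instead of recomputing every term's ancestry).
--     """
--     if leaves is None:
--         ancestors = set(hierarchy.keys())
--     else:
--         ancestors = _reachable(hierarchy, leaves) | set(leaves)
--     if roots is None:
--         descendants = set(hierarchy.keys())
--     else:
--         children: dict[str, list[str]] = {}
--         for k, ps in hierarchy.items():
--             for p in ps:
--                 children.setdefault(p, []).append(k)
--         descendants = _reachable(children, roots) | set(roots)
--     terms = ancestors & descendants
--     return {e: hierarchy.get(e, set()) for e in terms}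
-- ===== Notes on version B (the rewrite author's own statement) =====
-- stated objective: faster
-- what changed: Descendants come from a parent-to-children map built once plus a single worklist sweep down from the roots, instead of recomputing the full ancestor closure of every key and testing it against the roots; ancestors come from the same per-node worklist sweep up the parent edges instead of A's level-by-level recursive set comprehensions.
import Mathlib
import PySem

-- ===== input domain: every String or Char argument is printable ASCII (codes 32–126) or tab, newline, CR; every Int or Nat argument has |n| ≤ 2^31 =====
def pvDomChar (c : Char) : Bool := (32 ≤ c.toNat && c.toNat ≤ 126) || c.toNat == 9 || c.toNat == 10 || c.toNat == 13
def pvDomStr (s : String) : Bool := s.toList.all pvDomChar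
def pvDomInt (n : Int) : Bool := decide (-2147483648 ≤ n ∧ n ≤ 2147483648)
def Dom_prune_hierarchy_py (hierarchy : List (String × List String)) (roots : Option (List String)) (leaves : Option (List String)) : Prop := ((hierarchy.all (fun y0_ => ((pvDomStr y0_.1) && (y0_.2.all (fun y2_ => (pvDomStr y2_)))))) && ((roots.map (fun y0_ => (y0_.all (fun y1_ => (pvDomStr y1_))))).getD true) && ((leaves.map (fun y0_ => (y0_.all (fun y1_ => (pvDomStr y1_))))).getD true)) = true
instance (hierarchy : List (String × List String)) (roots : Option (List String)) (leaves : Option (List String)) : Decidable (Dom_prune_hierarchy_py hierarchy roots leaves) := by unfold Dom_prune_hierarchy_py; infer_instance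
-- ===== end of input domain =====

-- B is faster: it builds a parent→children map once and sweeps a worklist down from the roots
-- (and up from the leaves) instead of recomputing the whole ancestor set of every key;
-- equivalence is about return values (no argument is mutated).

-- shared input conversion: the Python argument is a dict mapping terms to SETS of parents
def pvToDict (hierarchy : List (String × List String)) : PySem.Dict String (List String) :=
  PySem.Dict.ofList (hierarchy.map (fun kv => (kv.1, PySem.Set.ofList kv.2)))

-- measure for the saturating loops of both ports: value-list elements not yet collected
def pvNewCount (m : PySem.Dict String (List String)) (anc : List String) : Nat :=
  ((m.values.flatten).filter (fun y => !(PySem.Set.contains anc y))).length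

theorem pv_length_filter_le {α : Type} (u : List α) (p q : α → Bool)
    (himp : ∀ y, p y = true → q y = true) :
    (u.filter p).length ≤ (u.filter q).length := by
  induction u with
  | nil => simp
  | cons a u ih =>
    simp only [List.filter_cons]
    by_cases hp : p a = true
    · rw [if_pos hp, if_pos (himp a hp)]
      simpa using ih
    · rw [if_neg hp]
      by_cases hq : q a = true
      · rw [if_pos hq]
        simp only [List.length_cons]
        omega
      · rw [if_neg hq]
        exact ih

theorem pv_length_filter_lt {α : Type} (u : List α) (p q : α → Bool)
    (himp : ∀ y, p y = true → q y = true) (x : α)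
    (hxu : x ∈ u) (hqx : q x = true) (hpx : p x = false) :
    (u.filter p).length < (u.filter q).length := by
  induction u with
  | nil => cases hxu
  | cons a u ih =>
    simp only [List.filter_cons]
    rcases List.mem_cons.mp hxu with h | h
    · subst h
      rw [if_neg (by simp [hpx]), if_pos hqx]
      have := pv_length_filter_le u p q himp
      simp only [List.length_cons]
      omega
    · have hlt := ih h
      by_cases hp : p a = true
      · rw [if_pos hp, if_pos (himp a hp)]
        simpa using hlt
      · rw [if_neg hp]
        by_cases hq : q a = true
        · rw [if_pos hq]
          simp only [List.length_cons]
          omega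
        · rw [if_neg hq]
          exact hlt

theorem pv_mem_updfold (ls : List (List String)) (acc : PySem.Set String) (y : String) :
    y ∈ ls.foldl (fun a s => PySem.Set.update a s) acc ↔ y ∈ acc ∨ ∃ s ∈ ls, y ∈ s := by
  induction ls generalizing acc with
  | nil => simp
  | cons s ls ih =>
    simp only [List.foldl_cons, ih, PySem.Set.mem_update, List.mem_cons]
    constructor
    · rintro (⟨h | h⟩ | ⟨s', hs', hy⟩)
      · exact Or.inl h
      · exact Or.inr ⟨s, Or.inl rfl, h⟩
      · exact Or.inr ⟨s', Or.inr hs', hy⟩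
    · rintro (h | ⟨s', (rfl | hs'), hy⟩)
      · exact Or.inl (Or.inl h)
      · exact Or.inl (Or.inr hy)
      · exact Or.inr ⟨s', hs', hy⟩

theorem pv_getD_sub_flatten (m : PySem.Dict String (List String)) (t y : String)
    (hy : y ∈ m.getD t []) : y ∈ m.values.flatten := by
  cases hq : m.get? t with
  | none => rw [PySem.Dict.getD_eq_get?_getD, hq] at hy; cases hy
  | some v =>
    rw [PySem.Dict.getD_eq_get?_getD, hq] at hy
    have hmem := PySem.Dict.mem_items_of_get?_eq_some m hq
    have hv : v ∈ m.values := by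
      simp only [PySem.Dict.values]
      exact List.mem_map.mpr ⟨(t, v), hmem, rfl⟩
    exact List.mem_flatten.mpr ⟨v, hv, hy⟩

theorem pvNewCount_lt (m : PySem.Dict String (List String)) (anc anc' : List String)
    (hsub : ∀ y ∈ anc, y ∈ anc') (x : String) (hxu : x ∈ m.values.flatten)
    (hxA : x ∉ anc) (hxA' : x ∈ anc') : pvNewCount m anc' < pvNewCount m anc := by
  apply pv_length_filter_lt
  · intro y hy
    simp only [PySem.Set.contains_eq_listContains, List.contains_eq_mem, Bool.not_eq_true',
      decide_eq_false_iff_not] at hy ⊢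
    intro hmem; exact hy (hsub y hmem)
  · exact hxu
  · simp [PySem.Set.contains_eq_listContains, List.contains_eq_mem, hxA]
  · simp [PySem.Set.contains_eq_listContains, List.contains_eq_mem, hxA']

-- ===== PORT A =====
-- the parents of a batch of terms: tmp = [hierarchy.get(e, set()) for e in terms];
-- parents = {parent for subset in tmp for parent in subset}
def pvParentsA (m : PySem.Dict String (List String)) (terms : List String) : PySem.Set String :=
  let tmp := terms.map (fun e => m.getD e [])
  tmp.foldl (fun acc s => PySem.Set.update acc s) PySem.Set.empty

-- _get_generic_ancestors: recursive level-by-level collection of parents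
def pvAncA (m : PySem.Dict String (List String)) (terms : List String)
    (ancestors : PySem.Set String) : PySem.Set String :=
  let parents := pvParentsA m terms
  let terms' := PySem.Set.diff parents ancestors
  let ancestors' := PySem.Set.union ancestors parents
  if h : 0 < terms'.length then pvAncA m terms' ancestors' else ancestors'
termination_by pvNewCount m ancestors
decreasing_by
  obtain ⟨x, hx⟩ := List.exists_mem_of_length_pos h
  rw [PySem.Set.mem_diff] at hx
  obtain ⟨hxp, hxa⟩ := hx
  have hxp' := hxp
  simp only [parents, pvParentsA] at hxp'
  rw [pv_mem_updfold] at hxp'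
  rcases hxp' with h0 | ⟨s, hs, hxs⟩
  · cases h0
  · obtain ⟨t, _, rfl⟩ := List.mem_map.mp hs
    exact pvNewCount_lt m ancestors _
      (fun y hy => (PySem.Set.mem_union _ _ _).mpr (Or.inl hy))
      x (pv_getD_sub_flatten m t x hxs) hxa
      ((PySem.Set.mem_union _ _ _).mpr (Or.inr hxp))

-- _get_generic_descendants: ancestry of EVERY key, then filter by intersection with the roots
def pvAncestryA (m : PySem.Dict String (List String)) : List (String × PySem.Set String) :=
  m.keys.map (fun e => (e, pvAncA m (PySem.Set.ofList [e]) PySem.Set.empty))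

def pvDescA (m : PySem.Dict String (List String)) (terms : PySem.Set String) : PySem.Set String :=
  (pvAncestryA m).foldl
    (fun acc dv => if 0 < (PySem.Set.inter dv.2 terms).length then PySem.Set.add acc dv.1 else acc)
    PySem.Set.empty

def prune_hierarchy_py (hierarchy : List (String × List String)) (roots : Option (List String)) (leaves : Option (List String)) : List (String × List String) :=
  let m := pvToDict hierarchy
  let ancestors := match leaves with
    | none => PySem.Set.ofList m.keys
    | some ls =>
        let L := PySem.Set.ofList ls
        PySem.Set.union (pvAncA m L PySem.Set.empty) L
  let descendants := match roots with
    | none => PySem.Set.ofList m.keys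
    | some rs =>
        let R := PySem.Set.ofList rs
        PySem.Set.union (pvDescA m R) R
  let terms := PySem.Set.inter ancestors descendants
  terms.map (fun e => (e, m.getD e []))

-- ===== PORT B =====
-- children map: parent ↦ list of keys having it as a parent (built once)
def pvChildMap (m : PySem.Dict String (List String)) : PySem.Dict String (List String) :=
  m.items.foldl
    (fun d kv => kv.2.foldl (fun d p => d.modify p [] (fun l => l ++ [kv.1])) d)
    PySem.Dict.empty

-- body of _reachable's inner for-loop: 'if nxt not in seen: seen.add(nxt); queue.append(nxt)'
def pvQstep (qs : List String × PySem.Set String) (p : String) : List String × PySem.Set String :=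
  if PySem.Set.contains qs.2 p then qs else (qs.1 ++ [p], PySem.Set.add qs.2 p)

-- lemmas the port needs for its termination argument (about pvQstep only)
theorem pv_filter_filter {α : Type} (l : List α) (p q : α → Bool) :
    (l.filter p).filter q = l.filter (fun a => p a && q a) := by
  rw [List.filter_filter]
  apply List.filter_congr
  intro a _
  exact Bool.and_comm _ _

theorem pv_diff_ofList_cons_of_mem (p : String) (ps s : List String) (hp : p ∈ s) :
    PySem.Set.diff (PySem.Set.ofList (p :: ps)) s = PySem.Set.diff (PySem.Set.ofList ps) s := by
  rw [PySem.Set.ofList_cons]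
  show List.filter _ (p :: _) = _
  rw [List.filter_cons_of_neg (by simp [PySem.Set.contains_eq_listContains, List.contains_eq_mem, hp])]
  show (List.filter _ (PySem.Set.ofList ps)).filter _ = _
  rw [pv_filter_filter]
  apply List.filter_congr
  intro y _
  by_cases hy : y ∈ s
  · simp [PySem.Set.contains_eq_listContains, List.contains_eq_mem, hy]
  · have hne : (y == p) = false := by
      simp only [beq_eq_false_iff_ne, ne_eq]
      rintro rfl; exact hy hp
    simp [PySem.Set.contains_eq_listContains, List.contains_eq_mem, hy, hne]

theorem pv_diff_ofList_cons_of_not_mem (p : String) (ps s : List String) (hp : p ∉ s) :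
    PySem.Set.diff (PySem.Set.ofList (p :: ps)) s =
      p :: PySem.Set.diff (PySem.Set.ofList ps) (PySem.Set.add s p) := by
  rw [PySem.Set.ofList_cons, PySem.Set.add_of_not_mem hp]
  show List.filter _ (p :: _) = _
  rw [List.filter_cons_of_pos (by simp [PySem.Set.contains_eq_listContains, List.contains_eq_mem, hp])]
  congr 1
  show (List.filter _ (PySem.Set.ofList ps)).filter _ = _
  rw [pv_filter_filter]
  apply List.filter_congr
  intro y _
  by_cases hy : y ∈ s
  · have hne : (y == p) = false := by
      simp only [beq_eq_false_iff_ne, ne_eq]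
      rintro rfl; exact hp hy
    simp [PySem.Set.contains_eq_listContains, List.contains_eq_mem, hy, hne]
  · by_cases hyp : y = p
    · subst hyp
      simp [PySem.Set.contains_eq_listContains, List.contains_eq_mem, hy]
    · simp [PySem.Set.contains_eq_listContains, List.contains_eq_mem, hy, hyp]

-- the inner for-loop appends exactly the new elements of ps (in first-occurrence order)
-- and the seen set becomes seen.update(ps)
theorem pvQstep_foldl (ps q s : List String) :
    ps.foldl pvQstep (q, s) =
      (q ++ PySem.Set.diff (PySem.Set.ofList ps) s, PySem.Set.update s ps) := by
  induction ps generalizing q s with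
  | nil =>
    have h0 : PySem.Set.diff (PySem.Set.ofList ([] : List String)) s = [] := rfl
    rw [List.foldl_nil, h0, List.append_nil]
    rfl
  | cons p ps ih =>
    simp only [List.foldl_cons, pvQstep]
    by_cases hp : p ∈ s
    · rw [if_pos (by simp [PySem.Set.contains_eq_listContains, List.contains_eq_mem, hp])]
      rw [ih, pv_diff_ofList_cons_of_mem p ps s hp, PySem.Set.update_cons,
        PySem.Set.add_of_mem hp]
    · rw [if_neg (by simp [PySem.Set.contains_eq_listContains, List.contains_eq_mem, hp])]
      rw [ih, pv_diff_ofList_cons_of_not_mem p ps s hp, PySem.Set.update_cons]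
      simp

-- _reachable's worklist loop: expand the head of the queue, append its unseen
-- neighbours to queue and seen, repeat until the queue is exhausted
def pvQ (m : PySem.Dict String (List String)) (queue : List String)
    (seen : PySem.Set String) : PySem.Set String :=
  match queue with
  | [] => seen
  | t :: rest =>
      pvQ m ((m.getD t []).foldl pvQstep (rest, seen)).1
        ((m.getD t []).foldl pvQstep (rest, seen)).2
termination_by (pvNewCount m seen, queue.length)
decreasing_by
  rw [pvQstep_foldl]
  rcases hN : PySem.Set.diff (PySem.Set.ofList (m.getD t [])) seen with _ | ⟨x, N⟩
  · have hupd : PySem.Set.update seen (m.getD t []) = seen := by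
      rw [PySem.Set.update_eq_append_filter]
      have : PySem.Set.diff (PySem.Set.ofList (m.getD t [])) seen =
          (PySem.Set.ofList (m.getD t [])).filter (fun y => !(PySem.Set.contains seen y)) := rfl
      rw [this] at hN
      rw [hN, List.append_nil]
    rw [hupd]
    exact Prod.Lex.right _ (by simp)
  · have hx : x ∈ PySem.Set.diff (PySem.Set.ofList (m.getD t [])) seen := by
      rw [hN]; exact List.mem_cons_self ..
    rw [PySem.Set.mem_diff, PySem.Set.mem_ofList] at hx
    obtain ⟨hxp, hxs⟩ := hx
    apply Prod.Lex.left
    exact pvNewCount_lt m seen _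
      (fun y hy => (PySem.Set.mem_update _ _ _).mpr (Or.inl hy))
      x (pv_getD_sub_flatten m t x hxp) hxs
      ((PySem.Set.mem_update _ _ _).mpr (Or.inr hxp))

def prune_hierarchy_py_alt (hierarchy : List (String × List String)) (roots : Option (List String)) (leaves : Option (List String)) : List (String × List String) :=
  let m := pvToDict hierarchy
  let ancestors := match leaves with
    | none => PySem.Set.ofList m.keys
    | some ls =>
        PySem.Set.union (pvQ m (PySem.Set.ofList ls) PySem.Set.empty) (PySem.Set.ofList ls)
  let descendants := match roots with
    | none => PySem.Set.ofList m.keys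
    | some rs =>
        PySem.Set.union (pvQ (pvChildMap m) (PySem.Set.ofList rs) PySem.Set.empty)
          (PySem.Set.ofList rs)
  let terms := PySem.Set.inter ancestors descendants
  terms.map (fun e => (e, m.getD e []))

-- ===== PRECONDITION & SPEC =====
def Spec_prune_hierarchy_py (hierarchy : List (String × List String)) (roots : Option (List String)) (leaves : Option (List String)) (out : List (String × List String)) : Prop := out = prune_hierarchy_py_alt hierarchy roots leaves
instance (hierarchy : List (String × List String)) (roots : Option (List String)) (leaves : Option (List String)) (out : List (String × List String)) : Decidable (Spec_prune_hierarchy_py hierarchy roots leaves out) := by unfold Spec_prune_hierarchy_py; infer_instance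

-- ===== CLAIM (what is proved, stated in full; the proofs are below) =====
def Claim_equal_prune_hierarchy_py : Prop := ∀ (hierarchy : List (String × List String)) (roots : Option (List String)) (leaves : Option (List String)), Dom_prune_hierarchy_py hierarchy roots leaves → Spec_prune_hierarchy_py hierarchy roots leaves (prune_hierarchy_py hierarchy roots leaves)

-- ===== LEMMAS AND PROOFS =====

-- proof-side level-by-level sweep: intermediate between A's recursion and B's worklist
def pvStep (m : PySem.Dict String (List String)) (frontier : List String) : PySem.Set String :=
  frontier.foldl (fun acc t => PySem.Set.update acc (m.getD t [])) PySem.Set.empty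

theorem pv_mem_stepfold (m : PySem.Dict String (List String)) (T : List String)
    (acc : PySem.Set String) (y : String) :
    y ∈ T.foldl (fun acc t => PySem.Set.update acc (m.getD t [])) acc ↔
      y ∈ acc ∨ ∃ t ∈ T, y ∈ m.getD t [] := by
  induction T generalizing acc with
  | nil => simp
  | cons t T ih =>
    simp only [List.foldl_cons, ih, PySem.Set.mem_update, List.mem_cons]
    constructor
    · rintro (⟨h | h⟩ | ⟨s, hs, hy⟩)
      · exact Or.inl h
      · exact Or.inr ⟨t, Or.inl rfl, h⟩
      · exact Or.inr ⟨s, Or.inr hs, hy⟩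
    · rintro (h | ⟨s, (rfl | hs), hy⟩)
      · exact Or.inl (Or.inl h)
      · exact Or.inl (Or.inr hy)
      · exact Or.inr ⟨s, hs, hy⟩

def pvReach (m : PySem.Dict String (List String)) (frontier : List String)
    (seen : PySem.Set String) : PySem.Set String :=
  let next := pvStep m frontier
  let frontier' := PySem.Set.diff next seen
  let seen' := PySem.Set.union seen next
  if h : 0 < frontier'.length then pvReach m frontier' seen' else seen'
termination_by pvNewCount m seen
decreasing_by
  obtain ⟨x, hx⟩ := List.exists_mem_of_length_pos h
  rw [PySem.Set.mem_diff] at hx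
  obtain ⟨hxp, hxa⟩ := hx
  have hxp' := hxp
  simp only [next, pvStep] at hxp'
  rw [pv_mem_stepfold] at hxp'
  rcases hxp' with h0 | ⟨t, _, hy⟩
  · cases h0
  · exact pvNewCount_lt m seen _
      (fun y hy => (PySem.Set.mem_union _ _ _).mpr (Or.inl hy))
      x (pv_getD_sub_flatten m t x hy) hxa
      ((PySem.Set.mem_union _ _ _).mpr (Or.inr hxp))

theorem pvParentsA_eq_pvStep (m : PySem.Dict String (List String)) (terms : List String) :
    pvParentsA m terms = pvStep m terms := by
  rw [pvParentsA, pvStep]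
  exact List.foldl_map

-- one-step unfoldings of the two level-wise loops
theorem pvAncA_unfold (m : PySem.Dict String (List String)) (terms : List String)
    (ancestors : PySem.Set String) :
    pvAncA m terms ancestors =
      if 0 < (PySem.Set.diff (pvStep m terms) ancestors).length then
        pvAncA m (PySem.Set.diff (pvStep m terms) ancestors)
          (PySem.Set.union ancestors (pvStep m terms))
      else PySem.Set.union ancestors (pvStep m terms) := by
  rw [pvAncA]
  simp only [pvParentsA_eq_pvStep]
  split <;> rfl

theorem pvReach_unfold (m : PySem.Dict String (List String)) (frontier : List String)
    (seen : PySem.Set String) :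
    pvReach m frontier seen =
      if 0 < (PySem.Set.diff (pvStep m frontier) seen).length then
        pvReach m (PySem.Set.diff (pvStep m frontier) seen)
          (PySem.Set.union seen (pvStep m frontier))
      else PySem.Set.union seen (pvStep m frontier) := by
  rw [pvReach]
  split <;> rfl

-- A's ancestor recursion IS the level-wise sweep (same level-by-level state)
theorem pvAncA_eq_pvReach (m : PySem.Dict String (List String)) (terms : List String)
    (ancestors : PySem.Set String) : pvAncA m terms ancestors = pvReach m terms ancestors := by
  induction terms, ancestors using pvAncA.induct m with
  | case1 terms ancestors parents terms' ancestors' hlt ih =>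
    simp only [terms', ancestors', parents, pvParentsA_eq_pvStep] at hlt ih
    rw [pvAncA_unfold, pvReach_unfold, if_pos hlt, if_pos hlt]
    exact ih
  | case2 terms ancestors parents terms' hnlt =>
    simp only [terms', parents, pvParentsA_eq_pvStep] at hnlt
    rw [pvAncA_unfold, pvReach_unfold, if_neg hnlt, if_neg hnlt]

-- ==== update/diff algebra, used to batch B's per-node worklist into whole levels ====

theorem pv_update_update (s a b : List String) :
    PySem.Set.update s (PySem.Set.update a b) = PySem.Set.update (PySem.Set.update s a) b := by
  induction b generalizing a with
  | nil => rfl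
  | cons x b ih =>
    rw [PySem.Set.update_cons a, PySem.Set.update_cons (PySem.Set.update s a), ih]
    congr 1
    by_cases hx : x ∈ a
    · rw [PySem.Set.add_of_mem hx,
        PySem.Set.add_of_mem ((PySem.Set.mem_update _ _ _).mpr (Or.inr hx))]
    · rw [PySem.Set.add_of_not_mem hx, PySem.Set.update_append]
      rfl

theorem pv_update_stepfold (m : PySem.Dict String (List String)) (q : List String)
    (a s : List String) :
    PySem.Set.update s (q.foldl (fun acc t => PySem.Set.update acc (m.getD t [])) a) =
      q.foldl (fun acc t => PySem.Set.update acc (m.getD t [])) (PySem.Set.update s a) := by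
  induction q generalizing a s with
  | nil => rfl
  | cons t q ih =>
    simp only [List.foldl_cons]
    rw [ih, pv_update_update]

theorem pv_contains_update (s a : List String) (y : String) :
    PySem.Set.contains (PySem.Set.update s a) y =
      (PySem.Set.contains s y || PySem.Set.contains a y) := by
  simp [PySem.Set.contains_eq_listContains, List.contains_eq_mem, PySem.Set.mem_update]

theorem pv_diff_update (a b s : List String) :
    PySem.Set.diff (PySem.Set.update a b) s =
      PySem.Set.diff a s ++ PySem.Set.diff (PySem.Set.ofList b) (PySem.Set.update s a) := by
  rw [PySem.Set.update_eq_append_filter a b]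
  show List.filter _ (a ++ _) = _
  rw [List.filter_append]
  congr 1
  show ((PySem.Set.ofList b).filter _).filter _ = _
  rw [pv_filter_filter]
  apply List.filter_congr
  intro y _
  rw [show (PySem.Set.contains (PySem.Set.update s a) y) =
        (PySem.Set.contains s y || PySem.Set.contains a y) from pv_contains_update s a y]
  cases PySem.Set.contains s y <;> cases PySem.Set.contains a y <;> rfl

theorem pv_diff_stepfold (m : PySem.Dict String (List String)) (q : List String)
    (a s : List String) :
    PySem.Set.diff (q.foldl (fun acc t => PySem.Set.update acc (m.getD t [])) a) s =
      PySem.Set.diff a s ++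
        PySem.Set.diff (q.foldl (fun acc t => PySem.Set.update acc (m.getD t [])) PySem.Set.empty)
          (PySem.Set.update s a) := by
  induction q generalizing a s with
  | nil => simp [PySem.Set.diff, PySem.Set.empty]
  | cons t q ih =>
    simp only [List.foldl_cons]
    rw [ih, ih (PySem.Set.update PySem.Set.empty (m.getD t [])) (PySem.Set.update s a),
      pv_diff_update]
    have h1 : PySem.Set.update PySem.Set.empty (m.getD t []) = PySem.Set.ofList (m.getD t []) := rfl
    have h2 : PySem.Set.update s (PySem.Set.update a (m.getD t [])) =
        PySem.Set.update (PySem.Set.update s a) (m.getD t []) := pv_update_update s a _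
    have h3 : PySem.Set.update (PySem.Set.update s a) (PySem.Set.ofList (m.getD t [])) =
        PySem.Set.update (PySem.Set.update s a) (m.getD t []) := by
      rw [← h1, pv_update_update]
      rfl
    rw [h1, h2, h3, List.append_assoc]

theorem pvQ_nil (m : PySem.Dict String (List String)) (s : PySem.Set String) :
    pvQ m [] s = s := by
  rw [pvQ]

theorem pvQ_cons (m : PySem.Dict String (List String)) (t : String) (rest : List String)
    (s : PySem.Set String) :
    pvQ m (t :: rest) s =
      pvQ m (rest ++ PySem.Set.diff (PySem.Set.ofList (m.getD t [])) s)
        (PySem.Set.update s (m.getD t [])) := by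
  rw [pvQ]
  simp only [pvQstep_foldl]

-- batching: running the worklist on q ++ f equals first absorbing ALL of q's neighbours
theorem pvQ_batch (m : PySem.Dict String (List String)) (q : List String) :
    ∀ (f : List String) (s : PySem.Set String),
      pvQ m (q ++ f) s =
        pvQ m (f ++ PySem.Set.diff (pvStep m q) s) (PySem.Set.update s (pvStep m q)) := by
  induction q with
  | nil =>
    intro f s
    have h1 : pvStep m [] = ([] : List String) := rfl
    rw [h1]
    show pvQ m f s = pvQ m (f ++ List.filter _ []) (PySem.Set.update s [])
    simp only [List.filter_nil, List.append_nil]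
    rfl
  | cons t q ih =>
    intro f s
    rw [List.cons_append, pvQ_cons, List.append_assoc, ih]
    have hstep : pvStep m (t :: q) =
        q.foldl (fun acc t => PySem.Set.update acc (m.getD t []))
          (PySem.Set.update PySem.Set.empty (m.getD t [])) := rfl
    have hq0 : pvStep m q =
        q.foldl (fun acc t => PySem.Set.update acc (m.getD t [])) PySem.Set.empty := rfl
    have hseen : PySem.Set.update s (pvStep m (t :: q)) =
        PySem.Set.update (PySem.Set.update s (m.getD t [])) (pvStep m q) := by
      rw [hstep, pv_update_stepfold, hq0, pv_update_stepfold]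
      congr 1
      rw [pv_update_update]
      rfl
    have hdiff : PySem.Set.diff (pvStep m (t :: q)) s =
        PySem.Set.diff (PySem.Set.ofList (m.getD t [])) s ++
          PySem.Set.diff (pvStep m q) (PySem.Set.update s (m.getD t [])) := by
      rw [hstep, pv_diff_stepfold, pv_update_update]
      rfl
    rw [hseen, hdiff, List.append_assoc]

-- B's per-node worklist computes the same seen list as the level-wise sweep
theorem pvQ_eq_pvReach (m : PySem.Dict String (List String)) (frontier : List String)
    (seen : PySem.Set String) : pvQ m frontier seen = pvReach m frontier seen := by
  induction frontier, seen using pvReach.induct m with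
  | case1 T A next frontier' seen' hlt ih =>
    simp only [frontier', seen', next] at hlt ih
    rw [pvReach_unfold, if_pos hlt, ← ih]
    have := pvQ_batch m T [] A
    rw [List.append_nil] at this
    rw [this]
    rfl
  | case2 T A next frontier' hnlt =>
    simp only [frontier', next] at hnlt
    rw [pvReach_unfold, if_neg hnlt]
    have hnil : PySem.Set.diff (pvStep m T) A = [] := by
      rcases h : PySem.Set.diff (pvStep m T) A with _ | ⟨x, xs⟩
      · rfl
      · exact absurd (by rw [h]; simp) hnlt
    have := pvQ_batch m T [] A
    rw [List.append_nil, hnil] at this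
    simp only [List.append_nil] at this
    rw [this, pvQ_nil]
    rfl

-- membership in one level expansion
theorem pv_mem_pvStep (m : PySem.Dict String (List String)) (T : List String) (y : String) :
    y ∈ pvStep m T ↔ ∃ t ∈ T, y ∈ m.getD t [] := by
  rw [pvStep, pv_mem_stepfold]; simp [PySem.Set.empty]

-- edge chains of a parent map (strict-ancestor relation)
inductive pvChain (m : PySem.Dict String (List String)) : String → String → Prop
  | single {d p : String} : p ∈ m.getD d [] → pvChain m d p
  | cons {d p a : String} : p ∈ m.getD d [] → pvChain m p a → pvChain m d a

-- frontier invariant: parents of everything seen are seen or about to be expanded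
def pvInv (m : PySem.Dict String (List String)) (T : List String) (A : PySem.Set String) : Prop :=
  ∀ a ∈ A, ∀ p ∈ m.getD a [], p ∈ A ∨ p ∈ pvStep m T

theorem pv_reach_mono (m : PySem.Dict String (List String)) (T : List String)
    (A : PySem.Set String) : ∀ x ∈ A, x ∈ pvReach m T A := by
  induction T, A using pvReach.induct m with
  | case1 T A next frontier' seen' hlt ih =>
    simp only [frontier', seen', next] at hlt ih
    intro x hx
    rw [pvReach_unfold, if_pos hlt]
    exact ih x ((PySem.Set.mem_union _ _ _).mpr (Or.inl hx))
  | case2 T A next frontier' hnlt =>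
    simp only [frontier', next] at hnlt
    intro x hx
    rw [pvReach_unfold, if_neg hnlt]
    exact (PySem.Set.mem_union _ _ _).mpr (Or.inl hx)

theorem pv_reach_step_sub (m : PySem.Dict String (List String)) (T : List String)
    (A : PySem.Set String) : ∀ x ∈ pvStep m T, x ∈ pvReach m T A := by
  intro x hx
  rw [pvReach_unfold]
  by_cases hc : 0 < (PySem.Set.diff (pvStep m T) A).length
  · rw [if_pos hc]
    exact pv_reach_mono m _ _ x ((PySem.Set.mem_union _ _ _).mpr (Or.inr hx))
  · rw [if_neg hc]
    exact (PySem.Set.mem_union _ _ _).mpr (Or.inr hx)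

theorem pv_reach_closed (m : PySem.Dict String (List String)) (T : List String)
    (A : PySem.Set String) (hinv : pvInv m T A) :
    ∀ a ∈ pvReach m T A, ∀ p ∈ m.getD a [], p ∈ pvReach m T A := by
  induction T, A using pvReach.induct m with
  | case1 T A next frontier' seen' hlt ih =>
    simp only [frontier', seen', next] at hlt ih
    intro a ha p hp
    rw [pvReach_unfold, if_pos hlt] at ha ⊢
    refine ih ?_ a ha p hp
    -- the invariant is preserved by one expansion step
    intro b hb q hq
    rcases (PySem.Set.mem_union _ _ _).mp hb with hbA | hbN
    · rcases hinv b hbA q hq with h1 | h2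
      · exact Or.inl ((PySem.Set.mem_union _ _ _).mpr (Or.inl h1))
      · exact Or.inl ((PySem.Set.mem_union _ _ _).mpr (Or.inr h2))
    · by_cases hbA : b ∈ A
      · rcases hinv b hbA q hq with h1 | h2
        · exact Or.inl ((PySem.Set.mem_union _ _ _).mpr (Or.inl h1))
        · exact Or.inl ((PySem.Set.mem_union _ _ _).mpr (Or.inr h2))
      · have hbT' : b ∈ PySem.Set.diff (pvStep m T) A := (PySem.Set.mem_diff _ _ _).mpr ⟨hbN, hbA⟩
        exact Or.inr ((pv_mem_pvStep m _ q).mpr ⟨b, hbT', hq⟩)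
  | case2 T A next frontier' hnlt =>
    simp only [frontier', next] at hnlt
    intro a ha p hp
    rw [pvReach_unfold, if_neg hnlt] at ha ⊢
    have hsub : ∀ x ∈ pvStep m T, x ∈ A := by
      intro x hx
      by_contra hxA
      exact hnlt (List.length_pos_of_mem ((PySem.Set.mem_diff _ _ _).mpr ⟨hx, hxA⟩))
    have haA : a ∈ A := by
      rcases (PySem.Set.mem_union _ _ _).mp ha with h | h
      · exact h
      · exact hsub a h
    rcases hinv a haA p hp with h1 | h2
    · exact (PySem.Set.mem_union _ _ _).mpr (Or.inl h1)
    · exact (PySem.Set.mem_union _ _ _).mpr (Or.inr h2)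

theorem pv_reach_sound (m : PySem.Dict String (List String)) (T : List String)
    (A : PySem.Set String) :
    ∀ x ∈ pvReach m T A, x ∈ A ∨ ∃ t ∈ T, pvChain m t x := by
  induction T, A using pvReach.induct m with
  | case1 T A next frontier' seen' hlt ih =>
    simp only [frontier', seen', next] at hlt ih
    intro x hx
    rw [pvReach_unfold, if_pos hlt] at hx
    rcases ih x hx with hA' | ⟨t', ht', hch⟩
    · rcases (PySem.Set.mem_union _ _ _).mp hA' with h | h
      · exact Or.inl h
      · obtain ⟨t, ht, hxt⟩ := (pv_mem_pvStep m T x).mp h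
        exact Or.inr ⟨t, ht, pvChain.single hxt⟩
    · have ht'N : t' ∈ pvStep m T := ((PySem.Set.mem_diff _ _ _).mp ht').1
      obtain ⟨t, ht, ht't⟩ := (pv_mem_pvStep m T t').mp ht'N
      exact Or.inr ⟨t, ht, pvChain.cons ht't hch⟩
  | case2 T A next frontier' hnlt =>
    simp only [frontier', next] at hnlt
    intro x hx
    rw [pvReach_unfold, if_neg hnlt] at hx
    rcases (PySem.Set.mem_union _ _ _).mp hx with h | h
    · exact Or.inl h
    · obtain ⟨t, ht, hxt⟩ := (pv_mem_pvStep m T x).mp h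
      exact Or.inr ⟨t, ht, pvChain.single hxt⟩

theorem pv_reach_complete (m : PySem.Dict String (List String)) (T : List String)
    (A : PySem.Set String) (hinv : pvInv m T A) :
    ∀ s x, pvChain m s x → (s ∈ T ∨ s ∈ pvReach m T A) → x ∈ pvReach m T A := by
  intro s x hch
  induction hch with
  | @single d p hp =>
    rintro (hT | hR)
    · exact pv_reach_step_sub m T A p ((pv_mem_pvStep m T p).mpr ⟨d, hT, hp⟩)
    · exact pv_reach_closed m T A hinv d hR p hp
  | @cons d p a hp _ ih =>
    rintro (hT | hR)
    · exact ih (Or.inr (pv_reach_step_sub m T A p ((pv_mem_pvStep m T p).mpr ⟨d, hT, hp⟩)))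
    · exact ih (Or.inr (pv_reach_closed m T A hinv d hR p hp))

theorem pv_reach_char (m : PySem.Dict String (List String)) (T : List String) (x : String) :
    x ∈ pvReach m T PySem.Set.empty ↔ ∃ t ∈ T, pvChain m t x := by
  have hinv : pvInv m T PySem.Set.empty := by intro a ha; cases ha
  constructor
  · intro hx
    rcases pv_reach_sound m T PySem.Set.empty x hx with h | h
    · cases h
    · exact h
  · rintro ⟨t, ht, hch⟩
    exact pv_reach_complete m T PySem.Set.empty hinv t x hch (Or.inl ht)

-- a chain starts at a key of the map
theorem pv_chain_fst_key (m : PySem.Dict String (List String)) (x r : String)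
    (h : pvChain m x r) : m.contains x = true := by
  have hp : ∃ p, p ∈ m.getD x [] := by
    cases h with
    | single hp => exact ⟨_, hp⟩
    | cons hp _ => exact ⟨_, hp⟩
  obtain ⟨p, hp⟩ := hp
  by_cases hc : m.contains x = true
  · exact hc
  · have hcf : m.contains x = false := by simpa using hc
    rw [PySem.Dict.getD_of_not_contains m ([] : List String) hcf] at hp
    cases hp

theorem pv_chain_snoc (m : PySem.Dict String (List String)) {x p r : String}
    (h : pvChain m x p) (hr : r ∈ m.getD p []) : pvChain m x r := by
  induction h with
  | single hq => exact pvChain.cons hq (pvChain.single hr)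
  | cons hq _ ih => exact pvChain.cons hq (ih hr)

-- membership in the children map: c is a key of m and p is one of its parents
theorem pv_childMap_inner (k : String) (v : List String)
    (d : PySem.Dict String (List String)) (p c : String) :
    c ∈ (v.foldl (fun d q => d.modify q [] (fun l => l ++ [k])) d).getD p [] ↔
      c ∈ d.getD p [] ∨ (k = c ∧ p ∈ v) := by
  induction v generalizing d with
  | nil => simp
  | cons q v ih =>
    rw [List.foldl_cons, ih, PySem.Dict.getD_modify]
    by_cases hpq : p = q
    · rw [if_pos hpq]
      subst hpq
      constructor
      · rintro (h | ⟨rfl, hv⟩)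
        · rcases List.mem_append.mp h with h | h
          · exact Or.inl h
          · exact Or.inr ⟨(List.mem_singleton.mp h).symm, List.mem_cons_self ..⟩
        · exact Or.inr ⟨rfl, List.mem_cons_of_mem _ hv⟩
      · rintro (h | ⟨rfl, _⟩)
        · exact Or.inl (List.mem_append.mpr (Or.inl h))
        · exact Or.inl (List.mem_append.mpr (Or.inr (List.mem_singleton.mpr rfl)))
    · rw [if_neg hpq]
      simp only [List.mem_cons]
      constructor
      · rintro (h | ⟨rfl, hv⟩)
        · exact Or.inl h
        · exact Or.inr ⟨rfl, Or.inr hv⟩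
      · rintro (h | ⟨rfl, (hq | hv)⟩)
        · exact Or.inl h
        · exact absurd hq hpq
        · exact Or.inr ⟨rfl, hv⟩

theorem pv_childMap_outer (L : List (String × List String))
    (d : PySem.Dict String (List String)) (p c : String) :
    c ∈ (L.foldl (fun d kv => kv.2.foldl (fun d q => d.modify q [] (fun l => l ++ [kv.1])) d) d).getD p [] ↔
      c ∈ d.getD p [] ∨ ∃ kv ∈ L, kv.1 = c ∧ p ∈ kv.2 := by
  induction L generalizing d with
  | nil => simp
  | cons kv L ih =>
    simp only [List.foldl_cons, ih, pv_childMap_inner, List.mem_cons]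
    constructor
    · rintro ((h | h) | ⟨kv', h', hc⟩)
      · exact Or.inl h
      · exact Or.inr ⟨kv, Or.inl rfl, h⟩
      · exact Or.inr ⟨kv', Or.inr h', hc⟩
    · rintro (h | ⟨kv', (rfl | h'), hc⟩)
      · exact Or.inl (Or.inl h)
      · exact Or.inl (Or.inr hc)
      · exact Or.inr ⟨kv', h', hc⟩

theorem pv_mem_childMap (m : PySem.Dict String (List String)) (hnd : m.keys.Nodup)
    (p c : String) :
    c ∈ (pvChildMap m).getD p [] ↔ m.contains c = true ∧ p ∈ m.getD c [] := by
  rw [pvChildMap, pv_childMap_outer]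
  simp only [PySem.Dict.getD_empty, List.not_mem_nil, false_or]
  constructor
  · rintro ⟨⟨k, v⟩, hkv, rfl, hpv⟩
    have hg : m.get? k = some v := (PySem.Dict.get?_eq_some_iff_mem_items m k v hnd).mpr hkv
    refine ⟨?_, ?_⟩
    · rw [PySem.Dict.contains_eq_isSome_get?, hg]; rfl
    · rw [PySem.Dict.getD_eq_get?_getD, hg]; exact hpv
  · rintro ⟨hc, hp⟩
    cases hg : m.get? c with
    | none => rw [PySem.Dict.contains_eq_isSome_get?, hg] at hc; cases hc
    | some v =>
      rw [PySem.Dict.getD_eq_get?_getD, hg] at hp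
      exact ⟨(c, v), PySem.Dict.mem_items_of_get?_eq_some m hg, rfl, hp⟩

-- chains in the children map are exactly reversed chains in the parent map
theorem pv_chain_flip (m : PySem.Dict String (List String)) (hnd : m.keys.Nodup)
    (r x : String) : pvChain (pvChildMap m) r x ↔ pvChain m x r := by
  constructor
  · intro h
    induction h with
    | @single d p hp =>
      exact pvChain.single ((pv_mem_childMap m hnd d p).mp hp).2
    | @cons d p a hp _ ih =>
      exact pv_chain_snoc m ih ((pv_mem_childMap m hnd d p).mp hp).2
  · intro h
    induction h with
    | @single d p hp =>
      have hd : m.contains d = true := pv_chain_fst_key m d p (pvChain.single hp)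
      exact pvChain.single ((pv_mem_childMap m hnd p d).mpr ⟨hd, hp⟩)
    | @cons d p a hp hch ih =>
      have hd : m.contains d = true := pv_chain_fst_key m d a (pvChain.cons hp hch)
      exact pv_chain_snoc (pvChildMap m) ih ((pv_mem_childMap m hnd p d).mpr ⟨hd, hp⟩)

-- membership in A's descendants fold
theorem pv_mem_add_if (l : List (String × PySem.Set String))
    (P : String × PySem.Set String → Prop) [DecidablePred P]
    (s : PySem.Set String) (y : String) :
    y ∈ l.foldl (fun acc dv => if P dv then PySem.Set.add acc dv.1 else acc) s ↔
      y ∈ s ∨ ∃ dv ∈ l, dv.1 = y ∧ P dv := by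
  induction l generalizing s with
  | nil => simp
  | cons dv l ih =>
    rw [List.foldl_cons]
    by_cases hP : P dv
    · rw [if_pos hP, ih]
      simp only [PySem.Set.mem_add, List.mem_cons]
      constructor
      · rintro (⟨h | h⟩ | ⟨dv', h', hy⟩)
        · exact Or.inl h
        · exact Or.inr ⟨dv, Or.inl rfl, h.symm, hP⟩
        · exact Or.inr ⟨dv', Or.inr h', hy⟩
      · rintro (h | ⟨dv', (rfl | h'), rfl, hy⟩)
        · exact Or.inl (Or.inl h)
        · exact Or.inl (Or.inr rfl)
        · exact Or.inr ⟨dv', h', rfl, hy⟩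
    · rw [if_neg hP, ih]
      simp only [List.mem_cons]
      constructor
      · rintro (h | ⟨dv', h', hy⟩)
        · exact Or.inl h
        · exact Or.inr ⟨dv', Or.inr h', hy⟩
      · rintro (h | ⟨dv', (rfl | h'), rfl, hy⟩)
        · exact Or.inl h
        · exact absurd hy hP
        · exact Or.inr ⟨dv', h', rfl, hy⟩

theorem pv_inter_len_pos (s t : PySem.Set String) :
    (0 < (PySem.Set.inter s t).length) ↔ ∃ y ∈ s, y ∈ t := by
  constructor
  · intro h
    obtain ⟨y, hy⟩ := List.exists_mem_of_length_pos h
    exact ⟨y, (PySem.Set.mem_inter _ _ _).mp hy⟩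
  · rintro ⟨y, hs, ht⟩
    exact List.length_pos_of_mem ((PySem.Set.mem_inter _ _ _).mpr ⟨hs, ht⟩)

theorem pv_ofList_singleton (x : String) : PySem.Set.ofList [x] = [x] := rfl

-- the two descendant computations agree (as membership)
theorem pv_desc_mem (m : PySem.Dict String (List String)) (hnd : m.keys.Nodup)
    (R : PySem.Set String) (x : String) :
    x ∈ pvDescA m R ↔ x ∈ pvReach (pvChildMap m) R PySem.Set.empty := by
  rw [pv_reach_char, pvDescA,
    pv_mem_add_if _ (fun dv => 0 < (PySem.Set.inter dv.2 R).length)]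
  simp only [PySem.Set.empty, List.not_mem_nil, false_or]
  constructor
  · rintro ⟨dv, hdv, rfl, hP⟩
    rw [pvAncestryA] at hdv
    obtain ⟨e, he, heq⟩ := List.mem_map.mp hdv
    have hdv' : dv = (e, pvAncA m (PySem.Set.ofList [e]) PySem.Set.empty) := heq.symm
    subst hdv'
    obtain ⟨y, hy1, hy2⟩ := (pv_inter_len_pos _ _).mp hP
    rw [pvAncA_eq_pvReach, pv_ofList_singleton, pv_reach_char] at hy1
    obtain ⟨t, ht, hch⟩ := hy1
    rcases List.mem_singleton.mp ht
    exact ⟨y, hy2, (pv_chain_flip m hnd y e).mpr hch⟩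
  · rintro ⟨r, hr, hch⟩
    have hch' : pvChain m x r := (pv_chain_flip m hnd r x).mp hch
    have hx : x ∈ m.keys :=
      (PySem.Dict.contains_iff_mem_keys m x).mp (pv_chain_fst_key m x r hch')
    refine ⟨(x, pvAncA m (PySem.Set.ofList [x]) PySem.Set.empty), ?_, rfl, ?_⟩
    · rw [pvAncestryA]; exact List.mem_map.mpr ⟨x, hx, rfl⟩
    · apply (pv_inter_len_pos _ _).mpr
      refine ⟨r, ?_, hr⟩
      rw [pvAncA_eq_pvReach, pv_ofList_singleton, pv_reach_char]
      exact ⟨x, List.mem_singleton.mpr rfl, hch'⟩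

-- intersection only reads the membership of its second argument
theorem pv_inter_congr (s t t' : PySem.Set String) (h : ∀ x, x ∈ t ↔ x ∈ t') :
    PySem.Set.inter s t = PySem.Set.inter s t' := by
  unfold PySem.Set.inter
  apply List.filter_congr
  intro x _
  simp only [PySem.Set.contains_eq_listContains, List.contains_eq_mem]
  exact decide_eq_decide.mpr (h x)

-- ===== VERDICT (by name: the statement is the Claim_ definition above) =====
theorem prune_hierarchy_py_spec : Claim_equal_prune_hierarchy_py := by
  intro hierarchy roots leaves _
  unfold Spec_prune_hierarchy_py
  have hnd : (pvToDict hierarchy).keys.Nodup := by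
    rw [pvToDict]; exact PySem.Dict.nodup_keys_ofList _
  have hanc : ∀ ls : List String,
      pvAncA (pvToDict hierarchy) (PySem.Set.ofList ls) PySem.Set.empty =
        pvQ (pvToDict hierarchy) (PySem.Set.ofList ls) PySem.Set.empty := fun ls =>
    (pvAncA_eq_pvReach _ _ _).trans (pvQ_eq_pvReach _ _ _).symm
  have hdesc : ∀ rs : List String, ∀ x : String,
      (x ∈ PySem.Set.union (pvDescA (pvToDict hierarchy) (PySem.Set.ofList rs)) (PySem.Set.ofList rs) ↔
       x ∈ PySem.Set.union (pvQ (pvChildMap (pvToDict hierarchy)) (PySem.Set.ofList rs) PySem.Set.empty) (PySem.Set.ofList rs)) := by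
    intro rs x
    rw [PySem.Set.mem_union, PySem.Set.mem_union, pv_desc_mem (pvToDict hierarchy) hnd,
      pvQ_eq_pvReach]
  cases roots with
  | none =>
    cases leaves with
    | none => rfl
    | some ls =>
      simp only [prune_hierarchy_py, prune_hierarchy_py_alt]
      rw [hanc]
  | some rs =>
    cases leaves with
    | none =>
      simp only [prune_hierarchy_py, prune_hierarchy_py_alt]
      congr 1
      exact pv_inter_congr _ _ _ (hdesc rs)
    | some ls =>
      simp only [prune_hierarchy_py, prune_hierarchy_py_alt]
      rw [hanc]
      congr 1
      exact pv_inter_congr _ _ _ (hdesc rs)
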